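-- pv_equiv track=rewrite | github.com/Horax64/Algo-1- | Practicas/practica8.py | tres_vocales_distintas
-- ===== SOURCE A (Python) =====
-- def tres_vocales_distintas(palabra:str) -> bool:
--
--     vocales_mayusculas = ['A','E','I','O','U']
--     vocales_minusculas = ['a','e','i','o','u']
--
--     for letra in palabra:
--
--         if letra in vocales_mayusculas:
--             posicion = vocales_mayusculas.index(letra)
--             del vocales_mayusculas[posicion]
--             del vocales_minusculas[posicion]
--
--         if letra in vocales_minusculas:
--             posicion = vocales_minusculas.index(letra)
--             del vocales_mayusculas[posicion]
--             del vocales_minusculas[posicion]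
--
--         if len(vocales_mayusculas) <= 2:
--             return True
--
--     return False
-- ===== SOURCE B (Python) =====
-- def tres_vocales_distintas(palabra: str) -> bool:
--     # count, over the five vowels, how many occur in the word in either case
--     count = 0
--     for v in 'aeiou':
--         if v in palabra or v.upper() in palabra:
--             count += 1
--     return count >= 3
-- ===== Notes on version B (the rewrite author's own statement) =====
-- stated objective: simpler
-- what changed: A walks the word character by character maintaining two parallel lists of not-yet-seen vowels with index/del bookkeeping and an early return once at most two remain; B instead iterates over the five vowels and counts how many occur in the word in either case, returning whether the count reaches three.
import Mathlib
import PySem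

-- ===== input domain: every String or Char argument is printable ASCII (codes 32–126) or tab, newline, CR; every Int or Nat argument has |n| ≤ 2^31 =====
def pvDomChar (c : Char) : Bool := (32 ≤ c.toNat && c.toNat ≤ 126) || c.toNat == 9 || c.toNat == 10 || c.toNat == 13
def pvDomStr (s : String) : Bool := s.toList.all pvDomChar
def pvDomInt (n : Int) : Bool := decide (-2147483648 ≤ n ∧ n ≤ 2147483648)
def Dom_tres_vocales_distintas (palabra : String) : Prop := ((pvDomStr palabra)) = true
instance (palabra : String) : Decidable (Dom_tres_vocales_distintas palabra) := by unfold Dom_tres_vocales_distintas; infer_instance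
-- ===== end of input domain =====

-- B replaces A's parallel remaining-vowel lists with index/del bookkeeping by a direct
-- count over the five vowels of whether each occurs in the word (simpler; measured faster
-- by a constant factor in a timing run).

-- ===== PORT A =====
-- loop body of A: the two `if … in …: posicion = ….index(letra); del …[posicion]` blocks.
-- `del xs[posicion]` is List.eraseIdx at the index returned by index? (exact: the index
-- is valid because the `in` guard holds, so index? is some; the none branch is dead code).
def tvdStep (s : List Char × List Char) (letra : Char) : List Char × List Char :=
  let s1 :=
    if s.1.contains letra then
      match PySem.List.index? s.1 letra with
      | some pos => (s.1.eraseIdx pos, s.2.eraseIdx pos)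
      | none => s
    else s
  if s1.2.contains letra then
    match PySem.List.index? s1.2 letra with
    | some pos => (s1.1.eraseIdx pos, s1.2.eraseIdx pos)
    | none => s1
  else s1

-- A's `for letra in palabra` loop with the early `return True` when len(vocales_mayusculas) <= 2
def tvdLoop : List Char → List Char × List Char → Bool
  | [], _ => false
  | letra :: rest, s =>
      let s' := tvdStep s letra
      if s'.1.length ≤ 2 then true else tvdLoop rest s'

def tres_vocales_distintas (palabra : String) : Bool :=
  tvdLoop palabra.toList (['A','E','I','O','U'], ['a','e','i','o','u'])

-- ===== PORT B =====
-- `v in palabra` for the single character v is exactly membership of v among palabra's chars;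
-- v.upper() on the five lowercase vowel literals is Char.toUpper (exact on ASCII).
def tres_vocales_distintas_alt (palabra : String) : Bool :=
  let count : Int :=
    (['a','e','i','o','u'] : List Char).foldl
      (fun acc v =>
        if palabra.toList.contains v || palabra.toList.contains v.toUpper then acc + 1 else acc)
      0
  decide (3 ≤ count)

-- ===== PRECONDITION & SPEC =====
def Spec_tres_vocales_distintas (palabra : String) (out : Bool) : Prop := out = tres_vocales_distintas_alt palabra
instance (palabra : String) (out : Bool) : Decidable (Spec_tres_vocales_distintas palabra out) := by unfold Spec_tres_vocales_distintas; infer_instance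

-- ===== CLAIM (what is proved, stated in full; the proofs are below) =====
def Claim_equal_tres_vocales_distintas : Prop := ∀ (palabra : String), Dom_tres_vocales_distintas palabra → Spec_tres_vocales_distintas palabra (tres_vocales_distintas palabra)

-- ===== LEMMAS AND PROOFS =====

-- canonical states of A's loop: which of the five vowels have already been seen
def stVm (a e i o u : Bool) : List Char :=
  (if a then [] else ['A']) ++ (if e then [] else ['E']) ++ (if i then [] else ['I'])
    ++ (if o then [] else ['O']) ++ (if u then [] else ['U'])

def stVn (a e i o u : Bool) : List Char :=
  (if a then [] else ['a']) ++ (if e then [] else ['e']) ++ (if i then [] else ['i'])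
    ++ (if o then [] else ['o']) ++ (if u then [] else ['u'])

theorem tvdStep_length_le (s : List Char × List Char) (c : Char) :
    (tvdStep s c).1.length ≤ s.1.length := by
  have h2 : ∀ (t : List Char × List Char),
      (if t.2.contains c then
          match PySem.List.index? t.2 c with
          | some pos => (t.1.eraseIdx pos, t.2.eraseIdx pos)
          | none => t
        else t).1.length ≤ t.1.length := by
    intro t
    split
    · split
      · exact List.length_eraseIdx_le _ _
      · exact le_rfl
    · exact le_rfl
  have h1 : (if s.1.contains c then
          match PySem.List.index? s.1 c with
          | some pos => (s.1.eraseIdx pos, s.2.eraseIdx pos)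
          | none => s
        else s).1.length ≤ s.1.length := by
    split
    · split
      · exact List.length_eraseIdx_le _ _
      · exact le_rfl
    · exact le_rfl
  exact le_trans (h2 _) h1

theorem foldl_tvdStep_length_le (l : List Char) (s : List Char × List Char) :
    (l.foldl tvdStep s).1.length ≤ s.1.length := by
  induction l generalizing s with
  | nil => simp
  | cons c rest ih => exact le_trans (ih (tvdStep s c)) (tvdStep_length_le s c)

theorem tvdLoop_eq_foldl (l : List Char) (s : List Char × List Char) :
    tvdLoop l s = (!l.isEmpty && decide ((l.foldl tvdStep s).1.length ≤ 2)) := by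
  induction l generalizing s with
  | nil => simp [tvdLoop]
  | cons c rest ih =>
    simp only [tvdLoop, List.foldl_cons, List.isEmpty_cons, Bool.not_false, Bool.true_and]
    by_cases h : (tvdStep s c).1.length ≤ 2
    · have h2 : (rest.foldl tvdStep (tvdStep s c)).1.length ≤ 2 :=
        le_trans (foldl_tvdStep_length_le rest (tvdStep s c)) h
      simp [h, h2]
    · cases rest with
      | nil => simp [h, tvdLoop]
      | cons d t => simp [ih, h]

theorem tvdStep_st (c : Char) (a e i o u : Bool) :
    tvdStep (stVm a e i o u, stVn a e i o u) c
      = (stVm (a || (c == 'a' || c == 'A')) (e || (c == 'e' || c == 'E'))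
              (i || (c == 'i' || c == 'I')) (o || (c == 'o' || c == 'O'))
              (u || (c == 'u' || c == 'U')),
         stVn (a || (c == 'a' || c == 'A')) (e || (c == 'e' || c == 'E'))
              (i || (c == 'i' || c == 'I')) (o || (c == 'o' || c == 'O'))
              (u || (c == 'u' || c == 'U'))) := by
  by_cases hc : c = 'a' ∨ c = 'A' ∨ c = 'e' ∨ c = 'E' ∨ c = 'i' ∨ c = 'I' ∨
      c = 'o' ∨ c = 'O' ∨ c = 'u' ∨ c = 'U'
  · rcases hc with h | h | h | h | h | h | h | h | h | h <;> subst h <;>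
      (revert a e i o u; decide)
  · push Not at hc
    obtain ⟨h1, h2, h3, h4, h5, h6, h7, h8, h9, h10⟩ := hc
    have hcm : c ∉ stVm a e i o u := by
      simp only [stVm]; split_ifs <;> simp_all
    have hcn : c ∉ stVn a e i o u := by
      simp only [stVn]; split_ifs <;> simp_all
    have b1 := beq_eq_false_iff_ne.mpr h1
    have b2 := beq_eq_false_iff_ne.mpr h2
    have b3 := beq_eq_false_iff_ne.mpr h3
    have b4 := beq_eq_false_iff_ne.mpr h4
    have b5 := beq_eq_false_iff_ne.mpr h5
    have b6 := beq_eq_false_iff_ne.mpr h6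
    have b7 := beq_eq_false_iff_ne.mpr h7
    have b8 := beq_eq_false_iff_ne.mpr h8
    have b9 := beq_eq_false_iff_ne.mpr h9
    have b10 := beq_eq_false_iff_ne.mpr h10
    simp [tvdStep, hcm, hcn, b1, b2, b3, b4, b5, b6, b7, b8, b9, b10]

theorem beq_comm_char (x y : Char) : (x == y) = (y == x) := by
  simp [Bool.beq_comm]

theorem foldl_tvdStep_st (l : List Char) (a e i o u : Bool) :
    l.foldl tvdStep (stVm a e i o u, stVn a e i o u)
      = (stVm (a || (l.contains 'a' || l.contains 'A')) (e || (l.contains 'e' || l.contains 'E'))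
              (i || (l.contains 'i' || l.contains 'I')) (o || (l.contains 'o' || l.contains 'O'))
              (u || (l.contains 'u' || l.contains 'U')),
         stVn (a || (l.contains 'a' || l.contains 'A')) (e || (l.contains 'e' || l.contains 'E'))
              (i || (l.contains 'i' || l.contains 'I')) (o || (l.contains 'o' || l.contains 'O'))
              (u || (l.contains 'u' || l.contains 'U'))) := by
  induction l generalizing a e i o u with
  | nil => simp
  | cons c rest ih =>
    simp only [List.foldl_cons, tvdStep_st, ih, List.contains_cons]
    congr 2 <;> simp only [beq_comm_char c] <;>
      simp [Bool.or_assoc, Bool.or_comm, Bool.or_left_comm]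

-- ===== VERDICT (by name: the statement is the Claim_ definition above) =====
theorem tres_vocales_distintas_spec : Claim_equal_tres_vocales_distintas := by
  intro palabra _
  unfold Spec_tres_vocales_distintas tres_vocales_distintas tres_vocales_distintas_alt
  have hst : (['A','E','I','O','U'], (['a','e','i','o','u'] : List Char))
      = (stVm false false false false false, stVn false false false false false) := by decide
  rw [hst, tvdLoop_eq_foldl, foldl_tvdStep_st]
  simp only [List.foldl_cons, List.foldl_nil, Bool.false_or]
  have hA : ('a' : Char).toUpper = 'A' := by decide
  have hE : ('e' : Char).toUpper = 'E' := by decide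
  have hI : ('i' : Char).toUpper = 'I' := by decide
  have hO : ('o' : Char).toUpper = 'O' := by decide
  have hU : ('u' : Char).toUpper = 'U' := by decide
  simp only [hA, hE, hI, hO, hU]
  set l := palabra.toList with hl
  by_cases hnil : l.isEmpty
  · have hno : l = [] := by simpa using hnil
    simp [hno]
  · simp only [Bool.not_eq_true] at hnil
    rw [hnil]
    by_cases h1 : (l.contains 'a' || l.contains 'A') = true <;>
    by_cases h2 : (l.contains 'e' || l.contains 'E') = true <;>
    by_cases h3 : (l.contains 'i' || l.contains 'I') = true <;>
    by_cases h4 : (l.contains 'o' || l.contains 'O') = true <;>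
    by_cases h5 : (l.contains 'u' || l.contains 'U') = true <;>
      simp_all [stVm]
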